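-- pv_equiv track=rewrite | github.com/yeseongcho/- | ICT 문제해결기법/PA3/pa3_21600685.before.py | find_index_q
-- ===== SOURCE A (Python) =====
-- def find_index_q(func, q, start, end) :
--     mid = (start+end)//2
--     if q >= func[len(func)-1][0] :
--         return len(func)-1
--     elif q == func[mid][0] :
--         return mid
--     elif q < func[mid][0] :
--         if q >= func[mid-1][0] and q < func[mid][0] :
--             return mid-1
--         else :
--             return find_index_q(func, q, start, mid-1)
--     else :
--         if q > func[mid][0] and q < func[mid+1][0] :
--             return mid
--         elif q == func[mid+1][0] :
--             return mid+1
--         else :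
--             return find_index_q(func, q, mid+1, end)
-- ===== SOURCE B (Python) =====
-- def find_index_q(func, q, start, end):
--     n = len(func)
--     if q >= func[n - 1][0]:
--         return n - 1
--     lo, hi = 0, n - 1
--     while lo < hi:
--         mid = (lo + hi + 1) // 2
--         if func[mid][0] <= q:
--             lo = mid
--         else:
--             hi = mid - 1
--     return lo
-- ===== Notes on version B (the rewrite author's own statement) =====
-- stated objective: simpler
-- what changed: Replaces A's five-way branch-ladder recursion (which probes func[mid-1] and func[mid+1] each level) by an iterative rightmost-'key <= q' bisection over the whole table with one comparison per step.
-- outside the precondition, e.g. on find_index_q([(0, 0), (1, 1), (1, 2), (3, 3)], 1, 0, 3): A returns 1, B returns 2; on find_index_q([(2, 0), (4, 0)], 1, 0, 1): A does not finish within the time limit, B returns 0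
import Mathlib
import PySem

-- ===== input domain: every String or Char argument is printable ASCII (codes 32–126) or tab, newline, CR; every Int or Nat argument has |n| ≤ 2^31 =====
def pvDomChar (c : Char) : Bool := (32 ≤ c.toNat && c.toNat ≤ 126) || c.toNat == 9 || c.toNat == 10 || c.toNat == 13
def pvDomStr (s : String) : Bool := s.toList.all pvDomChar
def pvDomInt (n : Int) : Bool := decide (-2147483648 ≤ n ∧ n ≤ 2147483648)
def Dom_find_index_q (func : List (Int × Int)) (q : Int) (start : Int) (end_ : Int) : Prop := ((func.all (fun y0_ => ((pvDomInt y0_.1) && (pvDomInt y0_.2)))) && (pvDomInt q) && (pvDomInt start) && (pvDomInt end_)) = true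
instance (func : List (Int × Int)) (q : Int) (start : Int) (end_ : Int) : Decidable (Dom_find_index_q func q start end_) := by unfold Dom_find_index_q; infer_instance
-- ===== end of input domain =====

-- B replaces A's ad-hoc branch-ladder recursion by an iterative rightmost-"key ≤ q" bisection
-- over the whole table (objective: simpler); return values agree on Pre_ (proved below).

-- ===== PORT A =====
-- func[i][0] with Python indexing; Pre_ keeps every index used in range, so the default is never read
def pvKey (func : List (Int × Int)) (i : Int) : Int := (PySem.List.pyGetD func i (0, 0)).1

-- A's recursion, step for step; fuel only makes it total (Pre_ guarantees it never runs out)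
def pvAStep (func : List (Int × Int)) (q : Int) : Nat → Int → Int → Int
  | 0, _, _ => 0
  | fuel + 1, start, end_ =>
    let mid := PySem.Int.floordiv (start + end_) 2
    if pvKey func ((func.length : Int) - 1) ≤ q then (func.length : Int) - 1
    else if q = pvKey func mid then mid
    else if q < pvKey func mid then
      if pvKey func (mid - 1) ≤ q ∧ q < pvKey func mid then mid - 1
      else pvAStep func q fuel start (mid - 1)
    else
      if pvKey func mid < q ∧ q < pvKey func (mid + 1) then mid
      else if q = pvKey func (mid + 1) then mid + 1
      else pvAStep func q fuel (mid + 1) end_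

def find_index_q (func : List (Int × Int)) (q : Int) (start : Int) (end_ : Int) : Int :=
  pvAStep func q ((end_ - start).toNat + 1) start end_

-- ===== PORT B =====
-- Source B's while-loop; fuel only makes it total (the interval shrinks each pass)
def pvBLoop (func : List (Int × Int)) (q : Int) : Nat → Int → Int → Int
  | 0, lo, _ => lo
  | fuel + 1, lo, hi =>
    if lo < hi then
      let mid := PySem.Int.floordiv (lo + hi + 1) 2
      if pvKey func mid ≤ q then pvBLoop func q fuel mid hi
      else pvBLoop func q fuel lo (mid - 1)
    else lo

def find_index_q_alt (func : List (Int × Int)) (q : Int) (start : Int) (end_ : Int) : Int :=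
  let n : Int := func.length
  if pvKey func (n - 1) ≤ q then n - 1
  else pvBLoop func q func.length 0 (n - 1)

-- ===== PRECONDITION & SPEC =====
-- Pre_ excludes: empty func (A raises IndexError); and, unless q ≥ the last key (where A
-- short-circuits and returns len-1 for any func and any start/end), any call that is not the
-- natural one — strictly sorted keys, start = 0, end = len-1, func[0][0] ≤ q — because elsewhere
-- A may diverge or raise, and on duplicate keys A's returned index is which duplicate the
-- midpoints happen to hit while B's is the rightmost (both defensible).
def Pre_find_index_q (func : List (Int × Int)) (q : Int) (start : Int) (end_ : Int) : Prop :=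
  func ≠ [] ∧
    ((func.map Prod.fst).getLast?.getD 0 ≤ q ∨
      ((func.map Prod.fst).Pairwise (· < ·) ∧ start = 0 ∧ end_ = (func.length : Int) - 1 ∧
        (func.map Prod.fst).headI ≤ q))
instance (func : List (Int × Int)) (q : Int) (start : Int) (end_ : Int) : Decidable (Pre_find_index_q func q start end_) := by unfold Pre_find_index_q; infer_instance

def pvWitness_find_index_q : (List (Int × Int)) × Int × Int × Int := ([(0, 0), (2, 5)], 1, 0, 1)

def Spec_find_index_q (func : List (Int × Int)) (q : Int) (start : Int) (end_ : Int) (out : Int) : Prop := out = find_index_q_alt func q start end_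
instance (func : List (Int × Int)) (q : Int) (start : Int) (end_ : Int) (out : Int) : Decidable (Spec_find_index_q func q start end_ out) := by unfold Spec_find_index_q; infer_instance

-- ===== CLAIM (what is proved, stated in full; the proofs are below) =====
def Claim_equal_find_index_q : Prop := ∀ (func : List (Int × Int)) (q : Int) (start : Int) (end_ : Int), Dom_find_index_q func q start end_ → Pre_find_index_q func q start end_ → Spec_find_index_q func q start end_ (find_index_q func q start end_)

-- ===== LEMMAS AND PROOFS =====

theorem pvKey_eq_getElem (func : List (Int × Int)) {i : Int} (h0 : 0 ≤ i)
    (h1 : i < (func.length : Int)) :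
    pvKey func i = (func[i.toNat]'(by omega)).1 := by
  unfold pvKey
  rw [PySem.List.pyGetD_eq_getElem func (0,0) h0 h1]

theorem pvKey_lt (func : List (Int × Int))
    (hp : (func.map Prod.fst).Pairwise (· < ·)) {i j : Int} (h0 : 0 ≤ i) (hij : i < j)
    (hj : j < (func.length : Int)) : pvKey func i < pvKey func j := by
  rw [pvKey_eq_getElem func h0 (by omega), pvKey_eq_getElem func (by omega) hj]
  have := (List.pairwise_iff_getElem.mp hp) i.toNat j.toNat
    (by simpa using (by omega : i.toNat < func.length))
    (by simpa using (by omega : j.toNat < func.length)) (by omega)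
  simpa using this

theorem pvKey_le (func : List (Int × Int))
    (hp : (func.map Prod.fst).Pairwise (· < ·)) {i j : Int} (h0 : 0 ≤ i) (hij : i ≤ j)
    (hj : j < (func.length : Int)) : pvKey func i ≤ pvKey func j := by
  rcases lt_or_eq_of_le hij with h | h
  · exact le_of_lt (pvKey_lt func hp h0 h hj)
  · rw [h]

-- A's recursion returns the unique index m with key m ≤ q < key (m+1)
theorem pvAStep_eq (func : List (Int × Int)) (q m : Int)
    (hp : (func.map Prod.fst).Pairwise (· < ·))
    (hm0 : 0 ≤ m) (hmn : m < (func.length : Int) - 1)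
    (hkm : pvKey func m ≤ q) (hkm1 : q < pvKey func (m + 1)) :
    ∀ (fuel : Nat) (start end_ : Int), start ≤ m → m ≤ end_ → end_ ≤ (func.length : Int) - 1 →
      0 ≤ start → (end_ - start).toNat < fuel → pvAStep func q fuel start end_ = m := by
  intro fuel
  induction fuel with
  | zero => intro start end_ _ _ _ _ hf; exact absurd hf (by omega)
  | succ f ih =>
    intro start end_ hs he hen hs0 hf
    have hq_last : q < pvKey func ((func.length : Int) - 1) := by
      have := pvKey_le func hp (by omega : (0:Int) ≤ m + 1)
        (by omega : m + 1 ≤ (func.length : Int) - 1) (by omega)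
      omega
    have hmid := PySem.Int.floordiv_two_mid_bounds (by omega : start ≤ end_)
    set mid := PySem.Int.floordiv (start + end_) 2 with hmiddef
    show (if pvKey func ((func.length : Int) - 1) ≤ q then (func.length : Int) - 1
      else if q = pvKey func mid then mid
      else if q < pvKey func mid then
        if pvKey func (mid - 1) ≤ q ∧ q < pvKey func mid then mid - 1
        else pvAStep func q f start (mid - 1)
      else
        if pvKey func mid < q ∧ q < pvKey func (mid + 1) then mid
        else if q = pvKey func (mid + 1) then mid + 1
        else pvAStep func q f (mid + 1) end_) = m
    rw [if_neg (by omega)]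
    by_cases h2 : q = pvKey func mid
    · rw [if_pos h2]
      -- mid = m
      by_cases hlt : mid < m
      · have := pvKey_lt func hp (by omega) hlt (by omega); omega
      by_cases hgt : m < mid
      · have := pvKey_le func hp (by omega : (0:Int) ≤ m + 1) (by omega : m + 1 ≤ mid) (by omega)
        omega
      omega
    rw [if_neg h2]
    by_cases h3 : q < pvKey func mid
    · rw [if_pos h3]
      have hmmid : m < mid := by
        by_contra h
        have := pvKey_le func hp (by omega) (by omega : mid ≤ m) (by omega)
        omega
      by_cases h4 : pvKey func (mid - 1) ≤ q ∧ q < pvKey func mid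
      · rw [if_pos h4]
        -- mid - 1 = m
        by_cases hlt : m < mid - 1
        · have := pvKey_le func hp (by omega : (0:Int) ≤ m + 1) (by omega : m + 1 ≤ mid - 1) (by omega)
          omega
        omega
      · rw [if_neg h4]
        have h5 : q < pvKey func (mid - 1) := by
          rcases not_and_or.mp h4 with h | h
          · omega
          · omega
        have hmlt : m < mid - 1 := by
          by_contra h
          have := pvKey_le func hp (by omega : (0:Int) ≤ mid - 1)
            (by omega : mid - 1 ≤ m) (by omega)
          omega
        exact ih start (mid - 1) hs (by omega) (by omega) hs0 (by omega)
    · rw [if_neg h3]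
      have hmidq : pvKey func mid < q := by omega
      have hmidm : mid ≤ m := by
        by_contra h
        have := pvKey_le func hp (by omega : (0:Int) ≤ m + 1) (by omega : m + 1 ≤ mid) (by omega)
        omega
      by_cases h4 : pvKey func mid < q ∧ q < pvKey func (mid + 1)
      · rw [if_pos h4]
        by_cases hgt : mid < m
        · have := pvKey_le func hp (by omega : (0:Int) ≤ mid + 1) (by omega : mid + 1 ≤ m) (by omega)
          omega
        omega
      · rw [if_neg h4]
        have h5 : pvKey func (mid + 1) ≤ q := by
          rcases not_and_or.mp h4 with h | h
          · omega
          · omega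
        by_cases h6 : q = pvKey func (mid + 1)
        · rw [if_pos h6]
          -- mid + 1 = m
          by_cases hlt : mid + 1 < m
          · have := pvKey_lt func hp (by omega : (0:Int) ≤ mid + 1) hlt (by omega)
            omega
          by_cases hgt : m < mid + 1
          · have := pvKey_le func hp (by omega : (0:Int) ≤ m + 1) (by omega : m + 1 ≤ mid + 1) (by omega)
            omega
          omega
        · rw [if_neg h6]
          have h7 : mid + 1 ≤ m := by
            by_contra h
            have hme : m = mid := by omega
            rw [hme] at hkm1
            omega
          exact ih (mid + 1) end_ h7 he hen (by omega) (by omega)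

-- B's loop returns the same index m
theorem pvBLoop_eq (func : List (Int × Int)) (q m : Int)
    (hp : (func.map Prod.fst).Pairwise (· < ·))
    (hm0 : 0 ≤ m) (hmn : m < (func.length : Int) - 1)
    (hkm : pvKey func m ≤ q) (hkm1 : q < pvKey func (m + 1)) :
    ∀ (fuel : Nat) (lo hi : Int), lo ≤ m → m ≤ hi → hi ≤ (func.length : Int) - 1 →
      0 ≤ lo → (hi - lo).toNat < fuel → pvBLoop func q fuel lo hi = m := by
  intro fuel
  induction fuel with
  | zero => intro lo hi _ _ _ _ hf; exact absurd hf (by omega)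
  | succ f ih =>
    intro lo hi hlo hhi hhin hlo0 hf
    by_cases hlh : lo < hi
    · have hmid := PySem.Int.floordiv_two_mid_bounds (by omega : lo + 1 ≤ hi)
      have hmid' : PySem.Int.floordiv (lo + 1 + hi) 2 = PySem.Int.floordiv (lo + hi + 1) 2 := by
        ring_nf
      rw [hmid'] at hmid
      set mid := PySem.Int.floordiv (lo + hi + 1) 2 with hmiddef
      show (if lo < hi then
        if pvKey func mid ≤ q then pvBLoop func q f mid hi else pvBLoop func q f lo (mid - 1)
        else lo) = m
      rw [if_pos hlh]
      by_cases hk : pvKey func mid ≤ q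
      · rw [if_pos hk]
        have hmm : mid ≤ m := by
          by_contra h
          have := pvKey_le func hp (by omega : (0:Int) ≤ m + 1) (by omega : m + 1 ≤ mid) (by omega)
          omega
        exact ih mid hi hmm hhi hhin (by omega) (by omega)
      · rw [if_neg hk]
        have hmm : m ≤ mid - 1 := by
          by_contra h
          have := pvKey_le func hp (by omega) (by omega : mid ≤ m) (by omega)
          omega
        exact ih lo (mid - 1) hlo hmm (by omega) hlo0 (by omega)
    · show (if lo < hi then
        if pvKey func (PySem.Int.floordiv (lo + hi + 1) 2) ≤ q then
          pvBLoop func q f (PySem.Int.floordiv (lo + hi + 1) 2) hi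
        else pvBLoop func q f lo (PySem.Int.floordiv (lo + hi + 1) 2 - 1)
        else lo) = m
      rw [if_neg hlh]
      omega

-- the "rightmost key ≤ q" index exists when key 0 ≤ q < key (n-1)
theorem pv_exists_m (func : List (Int × Int))
    (_hp : (func.map Prod.fst).Pairwise (· < ·)) (q : Int)
    (h0 : pvKey func 0 ≤ q) (hlast : q < pvKey func ((func.length : Int) - 1))
    (hne : func ≠ []) :
    ∃ m : Int, 0 ≤ m ∧ m < (func.length : Int) - 1 ∧
      pvKey func m ≤ q ∧ q < pvKey func (m + 1) := by
  have hn : 1 ≤ func.length := List.length_pos_iff.mpr hne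
  have hPM : pvKey func ((Nat.findGreatest (fun k => pvKey func (k : Int) ≤ q)
      (func.length - 1) : Nat) : Int) ≤ q :=
    Nat.findGreatest_spec (P := fun k => pvKey func (k : Int) ≤ q) (m := 0)
      (by omega) (by simpa using h0)
  set M := Nat.findGreatest (fun k => pvKey func (k : Int) ≤ q) (func.length - 1) with hMdef
  have hMle : M ≤ func.length - 1 := Nat.findGreatest_le _
  have hMlt : M < func.length - 1 := by
    by_contra h
    have hEq : ((M : Nat) : Int) = (func.length : Int) - 1 := by omega
    rw [hEq] at hPM
    omega
  have hnP : ¬ pvKey func ((M + 1 : Nat) : Int) ≤ q :=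
    Nat.findGreatest_is_greatest (P := fun k => pvKey func (k : Int) ≤ q)
      (k := M + 1) (n := func.length - 1) (by omega) (by omega)
  refine ⟨(M : Int), by omega, by omega, hPM, ?_⟩
  have hc : ((M + 1 : Nat) : Int) = (M : Int) + 1 := by omega
  rw [hc] at hnP
  omega

theorem pv_last_key (func : List (Int × Int)) (hne : func ≠ []) :
    (func.map Prod.fst).getLast?.getD 0 = pvKey func ((func.length : Int) - 1) := by
  have hn : 1 ≤ func.length := List.length_pos_iff.mpr hne
  have ht : ((func.length : Int) - 1).toNat = func.length - 1 := by omega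
  rw [pvKey_eq_getElem func (by omega) (by omega)]
  rw [List.getLast?_eq_getElem?, List.getElem?_eq_getElem (by simp; omega)]
  simp [ht]

theorem pv_head_key (func : List (Int × Int)) (hne : func ≠ []) :
    (func.map Prod.fst).headI = pvKey func 0 := by
  cases func with
  | nil => exact absurd rfl hne
  | cons a l => simp [List.headI, pvKey, PySem.List.pyGetD_zero_cons]

-- ===== VERDICT (by name: the statement is the Claim_ definition above) =====
theorem find_index_q_spec : Claim_equal_find_index_q := by
  intro func q start end_ _ hpre
  unfold Pre_find_index_q at hpre
  obtain ⟨hne, hcase⟩ := hpre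
  have hn : 1 ≤ func.length := List.length_pos_iff.mpr hne
  unfold Spec_find_index_q find_index_q find_index_q_alt
  by_cases hlast : pvKey func ((func.length : Int) - 1) ≤ q
  · -- both short-circuit
    simp only [pvAStep]
    rw [if_pos hlast, if_pos hlast]
  · have hq : q < pvKey func ((func.length : Int) - 1) := by omega
    rcases hcase with h | ⟨hp, hs, he, hh⟩
    · rw [pv_last_key func hne] at h; omega
    · rw [pv_head_key func hne] at hh
      obtain ⟨m, hm0, hmn, hkm, hkm1⟩ := pv_exists_m func hp q hh hq hne
      rw [pvAStep_eq func q m hp hm0 hmn hkm hkm1 _ start end_ (by omega) (by omega)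
        (by omega) (by omega) (by omega)]
      show m = if pvKey func ((func.length : Int) - 1) ≤ q then (func.length : Int) - 1
        else pvBLoop func q func.length 0 ((func.length : Int) - 1)
      rw [if_neg hlast]
      rw [pvBLoop_eq func q m hp hm0 hmn hkm hkm1 _ 0 ((func.length : Int) - 1)
        (by omega) (by omega) (by omega) (by omega) (by omega)]
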